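-- pv_equiv track=rewrite | github.com/techiaith/macsen-sgwrsfot | server/assistant/nlp/cy/lemmatization.py | aspirate_mutate
-- ===== SOURCE A (Python) =====
-- def aspirate_mutate(word):
--     mutable_letters = set(("c", "p", "t"))
--     nasal_map = [("ch", "ch"), ("c", "ch"), ("p", "ph"), ("th", "th"), ("t", "th")]
--     for mutable_letter in mutable_letters:
--         if word.startswith(mutable_letter):
--             for mutation in nasal_map:
--                 if word.startswith(mutation[0]):
--                     mutated_word = mutation[1] + word[(len(mutation[0])):]
--                     return mutated_word
--     return word
-- ===== SOURCE B (Python) =====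
-- def aspirate_mutate(word):
--     two = {"ch": "ch", "th": "th"}
--     one = {"c": "ch", "p": "ph", "t": "th"}
--     p2 = word[:2]
--     if p2 in two:
--         return two[p2] + word[2:]
--     p1 = word[:1]
--     if p1 in one:
--         return one[p1] + word[1:]
--     return word
-- ===== Notes on version B (the rewrite author's own statement) =====
-- stated objective: idiomatic
-- what changed: The nested scan (outer loop over the mutable-letter set guarding an inner ordered scan of the prefix list) is removed entirely: B does two direct dict lookups, first on the two-character prefix (ch/th) and then on the one-character prefix (c/p/t).
import Mathlib
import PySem

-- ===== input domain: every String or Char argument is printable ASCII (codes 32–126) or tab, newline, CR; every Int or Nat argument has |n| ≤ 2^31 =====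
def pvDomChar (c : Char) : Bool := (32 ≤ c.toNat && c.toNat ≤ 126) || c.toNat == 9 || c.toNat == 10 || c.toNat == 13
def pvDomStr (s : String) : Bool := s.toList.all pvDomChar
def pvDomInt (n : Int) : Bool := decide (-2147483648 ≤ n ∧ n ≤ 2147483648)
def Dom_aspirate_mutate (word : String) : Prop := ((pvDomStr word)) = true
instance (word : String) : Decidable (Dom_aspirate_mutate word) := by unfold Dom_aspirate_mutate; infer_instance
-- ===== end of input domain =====

-- B replaces A's nested scan (set loop guarding an ordered prefix-list scan) by two direct
-- dict lookups keyed on the two- then one-character prefix; same return value everywhere.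

-- ===== PORT A =====
-- string work done on the List Char side (PySem.Chars), wrapped back with String.ofList
def aspNasalMap : List (List Char × List Char) :=
  [(['c','h'], ['c','h']), (['c'], ['c','h']), (['p'], ['p','h']),
   (['t','h'], ['t','h']), (['t'], ['t','h'])]

-- inner 'for mutation in nasal_map' loop: first matching prefix returns the mutated word
def aspInner (cs : List Char) : List (List Char × List Char) → Option (List Char)
  | [] => none
  | (pre, rep) :: rest =>
    if PySem.Chars.startswith cs pre then
      some (rep ++ PySem.List.slice cs (some (pre.length : Int)) none)
    else aspInner cs rest

-- outer 'for mutable_letter in mutable_letters' loop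
def aspOuter (cs : List Char) : List (List Char) → List Char
  | [] => cs
  | l :: rest =>
    if PySem.Chars.startswith cs l then
      match aspInner cs aspNasalMap with
      | some r => r
      | none => aspOuter cs rest
    else aspOuter cs rest

def aspirate_mutate (word : String) : String :=
  String.ofList (aspOuter word.toList (PySem.Set.ofList [['c'], ['p'], ['t']]))

-- ===== PORT B =====
def aspTwoMap : PySem.Dict (List Char) (List Char) :=
  PySem.Dict.ofList [(['c','h'], ['c','h']), (['t','h'], ['t','h'])]
def aspOneMap : PySem.Dict (List Char) (List Char) :=
  PySem.Dict.ofList [(['c'], ['c','h']), (['p'], ['p','h']), (['t'], ['t','h'])]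

def aspAltCore (cs : List Char) : List Char :=
  match PySem.Dict.get? aspTwoMap (PySem.List.slice cs none (some 2)) with
  | some v => v ++ PySem.List.slice cs (some 2) none
  | none =>
    match PySem.Dict.get? aspOneMap (PySem.List.slice cs none (some 1)) with
    | some v => v ++ PySem.List.slice cs (some 1) none
    | none => cs

def aspirate_mutate_alt (word : String) : String :=
  String.ofList (aspAltCore word.toList)

-- ===== PRECONDITION & SPEC =====
def Spec_aspirate_mutate (word : String) (out : String) : Prop := out = aspirate_mutate_alt word
instance (word : String) (out : String) : Decidable (Spec_aspirate_mutate word out) := by unfold Spec_aspirate_mutate; infer_instance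

-- ===== CLAIM (what is proved, stated in full; the proofs are below) =====
def Claim_equal_aspirate_mutate : Prop := ∀ (word : String), Dom_aspirate_mutate word → Spec_aspirate_mutate word (aspirate_mutate word)

-- ===== LEMMAS AND PROOFS =====
set_option maxHeartbeats 1000000 in
theorem asp_core_eq (cs : List Char) :
    aspOuter cs (PySem.Set.ofList [['c'], ['p'], ['t']]) = aspAltCore cs := by
  have hT : aspTwoMap = PySem.Dict.mk [(['c','h'], ['c','h']), (['t','h'], ['t','h'])] := by decide
  have hO : aspOneMap =
      PySem.Dict.mk [(['c'], ['c','h']), (['p'], ['p','h']), (['t'], ['t','h'])] := by decide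
  match cs with
  | [] => decide
  | [c] =>
    by_cases hc : 'c' = c <;> by_cases hp : 'p' = c <;> by_cases ht : 't' = c <;> (try subst_vars) <;>
      simp_all [aspOuter, aspInner, aspAltCore, aspNasalMap, hT, hO,
        PySem.Dict.get?, List.find?, Option.map,
        PySem.Chars.startswith, PySem.List.slice, PySem.Set.ofList,
        List.isPrefixOf, Bool.beq_eq_decide_eq]
  | c :: d :: t =>
    by_cases hc : 'c' = c <;> by_cases hp : 'p' = c <;> by_cases ht : 't' = c <;>
      by_cases hd : 'h' = d <;> (try subst_vars) <;>
      simp_all [aspOuter, aspInner, aspAltCore, aspNasalMap, hT, hO,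
        PySem.Dict.get?, List.find?, Option.map,
        PySem.Chars.startswith, PySem.List.slice, PySem.Set.ofList,
        List.isPrefixOf, List.cons_beq_cons, beq_iff_eq, Bool.beq_eq_decide_eq]

-- ===== VERDICT (by name: the statement is the Claim_ definition above) =====
theorem aspirate_mutate_spec : Claim_equal_aspirate_mutate := by
  intro word _
  unfold Spec_aspirate_mutate aspirate_mutate aspirate_mutate_alt
  rw [asp_core_eq]
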